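-- pv_equiv track=rewrite | github.com/Simontwice/Portal-to-ISAbelle | scripts/dataset_mining/data_generation_utils.py | split_over_suffixes
-- ===== SOURCE A (Python) =====
-- def split_over_suffixes(fact_dict):
--     if fact_dict is None:
--         return {}
--     expanded_fact_dict = {}
--     fact_list = list(fact_dict.items())
--     fact_list.sort(key=lambda x: x.count("."), reverse=True)
--     for premise_name, premise_stmt in fact_list:
--         split = premise_name.split(".")
--         all_suffixes = [".".join(split[-i:]) for i in range(len(split))]
--         expanded_fact_dict = {
--             **expanded_fact_dict,
--             **{suff: (premise_name, premise_stmt) for suff in all_suffixes},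
--         }
--     return expanded_fact_dict
-- ===== SOURCE B (Python) =====
-- def _suffixes(parts):
--     """Proper dotted suffixes of a component list, shortest first."""
--     if len(parts) <= 1:
--         return []
--     tail = parts[1:]
--     return _suffixes(tail) + [".".join(tail)]
--
--
-- def split_over_suffixes(fact_dict):
--     if fact_dict is None:
--         return {}
--     expanded = {}
--     for name, stmt in sorted(fact_dict.items(), key=lambda x: x.count("."), reverse=True):
--         expanded[name] = (name, stmt)
--         for suffix in _suffixes(name.split(".")):
--             expanded[suffix] = (name, stmt)
--     return expanded
-- ===== Notes on version B (the rewrite author's own statement) =====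
-- stated objective: simpler
-- what changed: Replaces the per-fact dict-comprehension plus {**old, **new} merge (which rebuilds the whole accumulated dict on every fact) with plain in-place dict assignment, and generates the dotted suffixes with a small recursive helper on the component list instead of join-of-negative-slice over range(len).
import Mathlib
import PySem

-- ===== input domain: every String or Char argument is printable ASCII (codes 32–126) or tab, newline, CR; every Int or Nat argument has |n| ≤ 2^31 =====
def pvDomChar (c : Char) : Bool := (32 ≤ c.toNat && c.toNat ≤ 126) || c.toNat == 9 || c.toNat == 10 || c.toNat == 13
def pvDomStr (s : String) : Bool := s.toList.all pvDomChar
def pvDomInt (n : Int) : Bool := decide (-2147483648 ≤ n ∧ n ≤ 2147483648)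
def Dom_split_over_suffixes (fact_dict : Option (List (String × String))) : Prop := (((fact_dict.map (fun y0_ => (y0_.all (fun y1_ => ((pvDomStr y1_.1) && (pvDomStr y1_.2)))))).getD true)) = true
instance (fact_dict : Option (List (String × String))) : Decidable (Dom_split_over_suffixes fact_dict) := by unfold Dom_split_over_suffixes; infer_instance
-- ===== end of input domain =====

-- B replaces the per-fact dict-comprehension + `{**old, **new}` merge with plain in-place dict
-- assignment, and generates the dotted suffixes by a recursive helper on the component list
-- instead of join-of-negative-slice over range(len) (objective: simpler).

-- ===== PORT A =====
-- `premise_name.split(".")`: separator "." is nonempty, so PySem.Str.split? is always `some`; the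
-- `.getD []` default is never read (exact).
def split_over_suffixes (fact_dict : Option (List (String × String))) : List (String × String × String) :=
  match fact_dict with
  | none => []
  | some fd =>
    -- fact_list.sort(key=lambda x: x.count("."), reverse=True) — x is a 2-tuple, so count counts components == "."
    let fact_list := PySem.List.sorted fd
      (fun x => ((if x.1 = "." then 1 else 0) + (if x.2 = "." then 1 else 0) : Int)) true
    let expanded := fact_list.foldl (fun (acc : PySem.Dict String (String × String)) p =>
      let split := (PySem.Str.split? p.1 ".").getD []
      let all_suffixes := (PySem.List.pyRange 0 (split.length : Int) 1).map
        (fun i => PySem.Str.join "." (PySem.List.slice split (some (-i)) none))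
      -- {suff: (premise_name, premise_stmt) for suff in all_suffixes}
      let inner := all_suffixes.foldl
        (fun (d : PySem.Dict String (String × String)) suff => d.insert suff (p.1, p.2))
        PySem.Dict.empty
      -- {**expanded_fact_dict, **inner}
      inner.items.foldl (fun (a : PySem.Dict String (String × String)) kv => a.insert kv.1 kv.2) acc)
      PySem.Dict.empty
    expanded.items

-- ===== PORT B =====
-- helper _suffixes(parts): proper dotted suffixes of a component list, shortest first
def pvSuffs : List String → List String
  | [] => []
  | [_] => []
  | _ :: b :: t =>
    let tail := b :: t
    pvSuffs tail ++ [PySem.Str.join "." tail]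

def split_over_suffixes_alt (fact_dict : Option (List (String × String))) : List (String × String × String) :=
  match fact_dict with
  | none => []
  | some fd =>
    let expanded := (PySem.List.sorted fd
        (fun x => ((if x.1 = "." then 1 else 0) + (if x.2 = "." then 1 else 0) : Int)) true).foldl
      (fun (acc : PySem.Dict String (String × String)) p =>
        -- expanded[name] = (name, stmt)
        let acc := acc.insert p.1 (p.1, p.2)
        -- for suffix in _suffixes(name.split(".")): expanded[suffix] = (name, stmt)
        (pvSuffs ((PySem.Str.split? p.1 ".").getD [])).foldl
          (fun (d : PySem.Dict String (String × String)) suffix => d.insert suffix (p.1, p.2)) acc)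
      PySem.Dict.empty
    expanded.items

-- ===== PRECONDITION & SPEC =====
def Spec_split_over_suffixes (fact_dict : Option (List (String × String))) (out : List (String × String × String)) : Prop := out = split_over_suffixes_alt fact_dict
instance (fact_dict : Option (List (String × String))) (out : List (String × String × String)) : Decidable (Spec_split_over_suffixes fact_dict out) := by unfold Spec_split_over_suffixes; infer_instance

-- ===== CLAIM (what is proved, stated in full; the proofs are below) =====
def Claim_equal_split_over_suffixes : Prop := ∀ (fact_dict : Option (List (String × String))), Dom_split_over_suffixes fact_dict → Spec_split_over_suffixes fact_dict (split_over_suffixes fact_dict)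

-- ===== LEMMAS AND PROOFS =====

-- intercalate facts
theorem pv_ic_single (sep a : List Char) : List.intercalate sep [a] = a := by
  simp [List.intercalate]

theorem pv_ic_cons_ne (sep a : List Char) (xs : List (List Char)) (h : xs ≠ []) :
    List.intercalate sep (a :: xs) = a ++ sep ++ List.intercalate sep xs := by
  cases xs with
  | nil => exact absurd rfl h
  | cons b t => simp only [List.intercalate, List.intersperse_cons₂, List.flatten_cons, List.append_assoc]

theorem pv_ic_append2 (sep : List Char) (xs : List (List Char)) (a b : List Char) :
    List.intercalate sep (xs ++ [a, b]) = List.intercalate sep (xs ++ [a ++ sep ++ b]) := by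
  induction xs with
  | nil =>
    rw [List.nil_append, List.nil_append, pv_ic_cons_ne sep a [b] (by simp), pv_ic_single, pv_ic_single]
  | cons x t ih =>
    rw [List.cons_append, List.cons_append,
        pv_ic_cons_ne sep x (t ++ [a, b]) (by simp),
        pv_ic_cons_ne sep x (t ++ [a ++ sep ++ b]) (by simp), ih]

-- joining the pieces produced by splitOn.go reconstitutes the input
theorem pv_go_join (sep : List Char) :
    ∀ (fuel : Nat) (l cur : List Char) (acc : List (List Char)),
    PySem.Chars.join sep (PySem.Chars.splitOn.go sep fuel l cur acc)
      = PySem.Chars.join sep (((cur.reverse ++ l) :: acc).reverse) := by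
  intro fuel
  induction fuel with
  | zero => intro l cur acc; rfl
  | succ f ih =>
    intro l cur acc
    cases l with
    | nil => simp [PySem.Chars.splitOn.go]
    | cons c rest =>
      rw [PySem.Chars.splitOn.go]
      by_cases hp : sep.isPrefixOf (c :: rest) = true
      · rw [if_pos hp, ih]
        have hpre : sep <+: (c :: rest) := List.isPrefixOf_iff_prefix.mp hp
        have hl : sep ++ (c :: rest).drop sep.length = (c :: rest) :=
          List.prefix_iff_eq_append.mp hpre
        unfold PySem.Chars.join
        simp only [List.reverse_cons, List.reverse_nil, List.nil_append, List.append_assoc,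
          List.singleton_append]
        rw [show ((cur.reverse :: [(c :: rest).drop sep.length]) : List (List Char))
              = [cur.reverse, (c :: rest).drop sep.length] from rfl]
        rw [pv_ic_append2 sep acc.reverse cur.reverse ((c :: rest).drop sep.length)]
        rw [List.append_assoc cur.reverse sep, hl]
      · rw [if_neg hp, ih]
        simp
-- splitOn.go never returns the empty list
theorem pv_go_ne_nil (sep : List Char) :
    ∀ (fuel : Nat) (l cur : List Char) (acc : List (List Char)),
    PySem.Chars.splitOn.go sep fuel l cur acc ≠ [] := by
  intro fuel
  induction fuel with
  | zero => intro l cur acc; simp [PySem.Chars.splitOn.go]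
  | succ f ih =>
    intro l cur acc
    cases l with
    | nil => simp [PySem.Chars.splitOn.go]
    | cons c rest =>
      rw [PySem.Chars.splitOn.go]
      by_cases hp : sep.isPrefixOf (c :: rest) = true
      · rw [if_pos hp]; exact ih _ _ _
      · rw [if_neg hp]; exact ih _ _ _

theorem pv_join_splitOn (sep l : List Char) :
    PySem.Chars.join sep (PySem.Chars.splitOn l sep) = l := by
  unfold PySem.Chars.splitOn
  rw [pv_go_join sep]
  simp [PySem.Chars.join, pv_ic_single]

theorem pv_splitOn_ne_nil (sep l : List Char) : PySem.Chars.splitOn l sep ≠ [] := by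
  unfold PySem.Chars.splitOn
  exact pv_go_ne_nil _ _ _ _ _

-- str.split(".") at the Str level: some list whose char-level image is splitOn
theorem pv_split_dot (s : String) :
    ∃ L, PySem.Str.split? s "." = some L
      ∧ L.map String.toList = PySem.Chars.splitOn s.toList ['.'] := by
  have h := PySem.Str.split?_map s "."
  have hc : PySem.Chars.split? s.toList (".".toList) = some (PySem.Chars.splitOn s.toList ['.']) := by
    simp [PySem.Chars.split?]
  rw [hc] at h
  cases hs : PySem.Str.split? s "." with
  | none => rw [hs] at h; simp at h
  | some L =>
    rw [hs] at h
    exact ⟨L, rfl, by simpa using h⟩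

-- ".".join(s.split(".")) == s
theorem pv_join_split (s : String) :
    PySem.Str.join "." ((PySem.Str.split? s ".").getD []) = s := by
  rcases pv_split_dot s with ⟨L, hL, hmap⟩
  rw [hL]
  apply String.toList_injective
  rw [PySem.Str.toList_join]
  show PySem.Chars.join (".".toList) (L.map String.toList) = s.toList
  rw [hmap]
  exact pv_join_splitOn ['.'] s.toList

theorem pv_split_ne_nil (s : String) : ((PySem.Str.split? s ".").getD []) ≠ [] := by
  rcases pv_split_dot s with ⟨L, hL, hmap⟩
  rw [hL]
  intro h
  rw [Option.getD_some] at h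
  subst h
  exact pv_splitOn_ne_nil ['.'] s.toList (by simpa using hmap.symm)

-- the suffix helper, characterised by drops of the component list
theorem pv_suffs_eq (parts : List String) :
    pvSuffs parts = (List.range (parts.length - 1)).map
      (fun j => PySem.Str.join "." (parts.drop (parts.length - 1 - j))) := by
  induction parts with
  | nil => rfl
  | cons a t ih =>
    cases t with
    | nil => rfl
    | cons b u =>
      show pvSuffs (b :: u) ++ [PySem.Str.join "." (b :: u)] = _
      rw [ih]
      simp only [List.length_cons, Nat.add_sub_cancel]
      rw [List.range_succ, List.map_append, List.map_singleton]
      congr 1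
      · apply List.map_congr_left
        intro j hj
        have hjlt : j < u.length := List.mem_range.mp hj
        have h1 : u.length + 1 - j = (u.length - j) + 1 := by omega
        rw [h1, List.drop_succ_cons]
      · rw [show u.length + 1 - u.length = 1 by omega, List.drop_one, List.tail_cons]

-- A's per-fact suffix key list = full name followed by the proper suffixes, shortest first
theorem pv_keysA (s : String) :
    (PySem.List.pyRange 0 ((((PySem.Str.split? s ".").getD []).length : Nat) : Int) 1).map
      (fun i => PySem.Str.join "." (PySem.List.slice ((PySem.Str.split? s ".").getD []) (some (-i)) none))
    = s :: pvSuffs ((PySem.Str.split? s ".").getD []) := by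
  set parts := (PySem.Str.split? s ".").getD [] with hparts
  have hne : parts ≠ [] := pv_split_ne_nil s
  have hpos : 0 < parts.length := List.length_pos_iff.mpr hne
  have hcons : PySem.List.pyRange 0 (parts.length : Int) 1
      = 0 :: PySem.List.pyRange 1 (parts.length : Int) 1 :=
    PySem.List.pyRange_one_cons (by exact_mod_cast hpos)
  rw [hcons, List.map_cons]
  congr 1
  · -- i = 0: slice parts (some (-0)) none = parts, and join-of-split = s
    rw [show (-(0:Int)) = ((0:Nat) : Int) by norm_num, PySem.List.slice_from_natCast, List.drop_zero]
    exact pv_join_split s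
  · -- i = 1 .. len-1: slice parts (some (-i)) none = parts.drop (len - i)
    rw [PySem.List.pyRange_one, List.map_map, pv_suffs_eq parts]
    have hlen : (((parts.length : Int)) - 1).toNat = parts.length - 1 := by omega
    rw [hlen]
    apply List.map_congr_left
    intro j hj
    have hjlt : j < parts.length - 1 := List.mem_range.mp hj
    have h1 : (1 : Int) + (j : Int) = -(-(((j + 1 : Nat) : Int))) := by push_cast; ring
    show PySem.Str.join "." (PySem.List.slice parts (some (-(1 + (j : Int)))) none) = _
    rw [show -(1 + (j : Int)) = -(((j + 1 : Nat) : Int)) by push_cast; ring]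
    rw [PySem.List.slice_from_neg_natCast parts (j + 1) (by omega)]
    congr 2
    omega

-- dict lemmas: commuting / pushing inserts, and re-inserting a dict's items (for A's {**,**} merge)
theorem pv_comm (d : PySem.Dict String (String × String)) (k k' : String) (v v' : String × String)
    (hc : d.contains k = true) (hne : k' ≠ k) :
    (d.insert k' v').insert k v = (d.insert k v).insert k' v' := by
  apply PySem.Dict.ext
  have hck : (d.insert k' v').contains k = true := by
    rw [PySem.Dict.contains_insert]; simp [hc]
  by_cases h' : d.contains k' = true
  · have h'2 : (d.insert k v).contains k' = true := by
      rw [PySem.Dict.contains_insert]; simp [h']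
    rw [PySem.Dict.items_insert_of_contains (d.insert k' v') v hck,
        PySem.Dict.items_insert_of_contains d v' h',
        PySem.Dict.items_insert_of_contains (d.insert k v) v' h'2,
        PySem.Dict.items_insert_of_contains d v hc]
    rw [List.map_map, List.map_map]
    apply List.map_congr_left
    intro p _
    by_cases hp : p.1 = k' <;> by_cases hq : p.1 = k <;>
      simp_all [Function.comp, Ne.symm hne]
  · have h'2 : (d.insert k v).contains k' = false := by
      rw [PySem.Dict.contains_insert]
      simp [h', hne]
    rw [PySem.Dict.items_insert_of_contains (d.insert k' v') v hck,
        PySem.Dict.items_insert_of_not_contains d v' (by simpa using h'),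
        PySem.Dict.items_insert_of_not_contains (d.insert k v) v' h'2,
        PySem.Dict.items_insert_of_contains d v hc]
    simp [List.map_append, hne]

theorem pv_push (rest : List (String × String × String)) (d : PySem.Dict String (String × String))
    (k : String) (v : String × String) (hc : d.contains k = true) (hk : ∀ e ∈ rest, e.1 ≠ k) :
    (rest.foldl (fun a kv => a.insert kv.1 kv.2) d).insert k v
      = rest.foldl (fun a kv => a.insert kv.1 kv.2) (d.insert k v) := by
  induction rest generalizing d with
  | nil => rfl
  | cons e t ih =>
    simp only [List.foldl_cons]
    have hc' : (d.insert e.1 e.2).contains k = true := by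
      rw [PySem.Dict.contains_insert]; simp [hc]
    rw [ih (d.insert e.1 e.2) hc' (fun x hx => hk x (List.mem_cons_of_mem _ hx)),
        pv_comm (d) k e.1 v e.2 hc (hk e (List.mem_cons_self))]

theorem pv_items_step_aux (l : List (String × String × String))
    (hnd : (l.map (fun p => p.1)).Nodup) {k : String} (hmem : k ∈ l.map (fun p => p.1))
    {v : String × String} (acc : PySem.Dict String (String × String)) :
    (l.map (fun p => if (p.1 == k) = true then (k, v) else p)).foldl
        (fun a kv => a.insert kv.1 kv.2) acc
      = (l.foldl (fun a kv => a.insert kv.1 kv.2) acc).insert k v := by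
  induction l generalizing acc with
  | nil => simp at hmem
  | cons e t ih =>
    by_cases he : e.1 = k
    · subst he
      have hkt : e.1 ∉ t.map (fun p => p.1) := by
        simp only [List.map_cons, List.nodup_cons] at hnd
        exact hnd.1
      have hk2 : ∀ x ∈ t, x.1 ≠ e.1 := fun x hx h => hkt (h ▸ List.mem_map_of_mem hx)
      have hmap : t.map (fun p => if (p.1 == e.1) = true then (e.1, v) else p) = t := by
        conv_rhs => rw [← List.map_id t]
        exact List.map_congr_left (fun p hp => by simp [hk2 p hp])
      simp only [List.map_cons, List.foldl_cons, hmap]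
      rw [if_pos (by simp : (e.1 == e.1) = true)]
      show (t.foldl (fun a kv => a.insert kv.1 kv.2) (acc.insert e.1 v))
        = (t.foldl (fun a kv => a.insert kv.1 kv.2) (acc.insert e.1 e.2)).insert e.1 v
      rw [pv_push t (acc.insert e.1 e.2) e.1 v
            (by rw [PySem.Dict.contains_insert]; simp) hk2,
          PySem.Dict.insert_insert_self]
    · have hbe : (e.1 == k) = false := by simp [he]
      simp only [List.map_cons, List.foldl_cons]
      rw [if_neg (by simp [he])]
      have hmem' : k ∈ t.map (fun p => p.1) := by
        rcases List.mem_map.mp hmem with ⟨x, hx, hx1⟩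
        rcases List.mem_cons.mp hx with h | h
        · exact absurd (h ▸ hx1) he
        · exact List.mem_map.mpr ⟨x, h, hx1⟩
      exact ih (by simp only [List.map_cons, List.nodup_cons] at hnd; exact hnd.2)
        hmem' (acc.insert e.1 e.2)

theorem pv_items_step (d : PySem.Dict String (String × String)) (hnd : d.keys.Nodup)
    (acc : PySem.Dict String (String × String)) (k : String) (v : String × String) :
    (d.insert k v).items.foldl (fun a kv => a.insert kv.1 kv.2) acc
      = (d.items.foldl (fun a kv => a.insert kv.1 kv.2) acc).insert k v := by
  by_cases hc : d.contains k = true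
  · rw [PySem.Dict.items_insert_of_contains _ v hc]
    have hmem : k ∈ d.items.map (fun p => p.1) :=
      (PySem.Dict.contains_iff_mem_keys d k).mp hc
    exact pv_items_step_aux d.items hnd hmem acc
  · rw [PySem.Dict.items_insert_of_not_contains _ v (by simpa using hc)]
    rw [List.foldl_append]
    rfl

-- merging a dict built from pair list t into acc = inserting t into acc directly
theorem pv_merge (t : List (String × String × String)) (d acc : PySem.Dict String (String × String))
    (hnd : d.keys.Nodup) :
    (t.foldl (fun a kv => a.insert kv.1 kv.2) d).items.foldl (fun a kv => a.insert kv.1 kv.2) acc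
      = t.foldl (fun a kv => a.insert kv.1 kv.2) (d.items.foldl (fun a kv => a.insert kv.1 kv.2) acc) := by
  induction t generalizing d acc with
  | nil => rfl
  | cons e t ih =>
    simp only [List.foldl_cons]
    rw [ih (d.insert e.1 e.2) acc (PySem.Dict.nodup_keys_insert d e.1 e.2 hnd),
        pv_items_step d hnd acc e.1 e.2]

-- folding constant-valued inserts over keys = folding the paired-up list
theorem pv_foldl_pairup (l : List String) (nv : String × String) (d : PySem.Dict String (String × String)) :
    l.foldl (fun a s => a.insert s nv) d
      = (l.map (fun s => (s, nv))).foldl (fun a kv => a.insert kv.1 kv.2) d := by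
  induction l generalizing d with
  | nil => rfl
  | cons s t ih =>
    simp only [List.foldl_cons, List.map_cons]
    exact ih _

-- ===== VERDICT (by name: the statement is the Claim_ definition above) =====
theorem split_over_suffixes_spec : Claim_equal_split_over_suffixes := by
  intro fact_dict _
  unfold Spec_split_over_suffixes
  cases fact_dict with
  | none => rfl
  | some fd =>
    show ((PySem.List.sorted fd
        (fun x => ((if x.1 = "." then 1 else 0) + (if x.2 = "." then 1 else 0) : Int)) true).foldl
        (fun (acc : PySem.Dict String (String × String)) p =>
          ((((PySem.List.pyRange 0 ((((PySem.Str.split? p.1 ".").getD []).length : Nat) : Int) 1).map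
              (fun i => PySem.Str.join "." (PySem.List.slice ((PySem.Str.split? p.1 ".").getD []) (some (-i)) none))).foldl
            (fun (d : PySem.Dict String (String × String)) suff => d.insert suff (p.1, p.2))
            PySem.Dict.empty).items).foldl
            (fun (a : PySem.Dict String (String × String)) kv => a.insert kv.1 kv.2) acc)
        PySem.Dict.empty).items
      = _
    congr 2
    funext acc p
    rw [pv_foldl_pairup, pv_merge _ _ _ PySem.Dict.nodup_keys_empty]
    rw [pv_keysA p.1]
    show ((p.1 :: pvSuffs ((PySem.Str.split? p.1 ".").getD [])).map (fun s => (s, (p.1, p.2)))).foldl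
        (fun a kv => a.insert kv.1 kv.2) acc = _
    rw [List.map_cons, List.foldl_cons, ← pv_foldl_pairup]
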